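-- pv_equiv track=rewrite | github.com/cuevasrja/minimum-graph-coloring-python | src/lib/eval_functions.py | eval_sum_of_squared_color_sizes
-- ===== SOURCE A (Python) =====
-- from typing import List, Set
--
-- def eval_sum_of_squared_color_sizes(coloring: dict[int, str]) -> int:
--     """
--     Evalúa una coloración de un grafo sumando el cuadrado de la
--     cantidad de nodos que tienen cada color.
--
--     Si se maximiza esta función, implica que se minimiza la cantidad de colores.
--     """
--     # Obtener los colores utilizados en la coloración (a partir de coloring)
--     colors: Set[str] = {color for color in coloring.values()}
--
--     # Inicializar la suma de cuadrados de tamaños de colores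
--     sum_of_squared_color_sizes: int = 0
--
--     # Iterar sobre los colores
--     for color in colors:
--         # Hallar los nodos que tienen el color actual
--         nodes: List[int] = [node for node, c in coloring.items() if c == color]
--
--         # Calcular el cuadrado de la cantidad de nodos
--         squared_size: int = len(nodes) ** 2
--
--         # Sumar el cuadrado al total
--         sum_of_squared_color_sizes += squared_size
--
--     return sum_of_squared_color_sizes
-- ===== SOURCE B (Python) =====
-- def eval_sum_of_squared_color_sizes(coloring: dict[int, str]) -> int:
--     """One flat pass: running sum of squares via the (k+1)^2 - k^2 = 2k+1 delta."""
--     counts: dict[str, int] = {}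
--     total = 0
--     for c in coloring.values():
--         k = counts.get(c, 0)
--         total += 2 * k + 1
--         counts[c] = k + 1
--     return total
-- ===== Notes on version B (the rewrite author's own statement) =====
-- stated objective: faster
-- what changed: Replaced the per-color rescan of all items (build the color set, then for each color list and count its nodes) by a single pass over the values that keeps a running count per color and adds the incremental delta 2k+1 to a running total.
import Mathlib
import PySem

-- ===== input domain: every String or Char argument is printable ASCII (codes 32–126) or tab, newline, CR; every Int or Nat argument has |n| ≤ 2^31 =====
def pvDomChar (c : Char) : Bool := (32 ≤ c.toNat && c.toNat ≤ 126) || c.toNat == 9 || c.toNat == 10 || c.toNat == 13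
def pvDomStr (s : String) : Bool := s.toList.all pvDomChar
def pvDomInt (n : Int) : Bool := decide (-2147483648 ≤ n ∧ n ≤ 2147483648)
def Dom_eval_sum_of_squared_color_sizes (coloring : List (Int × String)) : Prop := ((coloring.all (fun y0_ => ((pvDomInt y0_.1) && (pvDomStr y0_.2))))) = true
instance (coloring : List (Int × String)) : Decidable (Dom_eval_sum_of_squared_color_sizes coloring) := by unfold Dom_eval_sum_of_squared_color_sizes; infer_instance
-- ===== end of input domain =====

-- B replaces A's per-color rescan of all items by one pass over the values with a
-- running per-color count and the incremental delta (k+1)^2 - k^2 = 2k+1 (objective: faster).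

-- ===== PORT A =====
def eval_sum_of_squared_color_sizes (coloring : List (Int × String)) : Int :=
  -- colors = {color for color in coloring.values()}
  let colors : PySem.Set String := PySem.Set.ofList (coloring.map (fun p => p.2))
  -- for color in colors: nodes = [node for node, c in coloring.items() if c == color]; sum += len(nodes) ** 2
  -- (sum over the set's elements: order-independent, so iterating the Set list is exact)
  colors.foldl (fun acc color =>
    let nodes : List Int := (coloring.filter (fun p => p.2 == color)).map (fun p => p.1)
    let squared_size : Int := (nodes.length : Int) ^ 2
    acc + squared_size) 0

-- ===== PORT B =====
-- one loop step of B: read k = counts.get(c, 0), add 2k+1 to total, set counts[c] = k+1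
def pvStepB (st : PySem.Dict String Int × Int) (c : String) : PySem.Dict String Int × Int :=
  let k := st.1.getD c 0
  (st.1.insert c (k + 1), st.2 + 2 * k + 1)

def eval_sum_of_squared_color_sizes_alt (coloring : List (Int × String)) : Int :=
  ((coloring.map (fun p => p.2)).foldl pvStepB (PySem.Dict.empty, 0)).2

-- ===== PRECONDITION & SPEC =====
def Spec_eval_sum_of_squared_color_sizes (coloring : List (Int × String)) (out : Int) : Prop := out = eval_sum_of_squared_color_sizes_alt coloring
instance (coloring : List (Int × String)) (out : Int) : Decidable (Spec_eval_sum_of_squared_color_sizes coloring out) := by unfold Spec_eval_sum_of_squared_color_sizes; infer_instance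

-- ===== CLAIM (what is proved, stated in full; the proofs are below) =====
def Claim_equal_eval_sum_of_squared_color_sizes : Prop := ∀ (coloring : List (Int × String)), Dom_eval_sum_of_squared_color_sizes coloring → Spec_eval_sum_of_squared_color_sizes coloring (eval_sum_of_squared_color_sizes coloring)

-- ===== LEMMAS AND PROOFS =====

-- the common value: sum over the distinct colors of (multiplicity in v)^2
def pvS (v : List String) : Int :=
  ((PySem.Set.ofList v).map (fun c => ((v.count c : Int)) ^ 2)).sum

lemma pvA_eq_S (coloring : List (Int × String)) :
    eval_sum_of_squared_color_sizes coloring = pvS (coloring.map (fun p => p.2)) := by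
  unfold eval_sum_of_squared_color_sizes pvS
  rw [PySem.List.foldl_add]
  simp only [List.length_map, zero_add]
  congr 1
  apply List.map_congr_left
  intro c _
  congr 2
  rw [List.count_eq_countP, List.countP_map, List.countP_eq_length_filter]
  rfl

lemma pvS_append (v : List String) (c : String) :
    pvS (v ++ [c]) = pvS v + 2 * (v.count c : Int) + 1 := by
  have hof : PySem.Set.ofList (v ++ [c]) = PySem.Set.add (PySem.Set.ofList v) c := by
    unfold PySem.Set.ofList
    rw [List.foldl_append]
    rfl
  by_cases hc : c ∈ v
  · -- color already present: the set is unchanged, only c's count grows by one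
    have hadd : PySem.Set.add (PySem.Set.ofList v) c = PySem.Set.ofList v := by
      unfold PySem.Set.add
      rw [if_pos ((PySem.Set.contains_iff _ _).2 ((PySem.Set.mem_ofList v c).2 hc))]
    have hnd := PySem.Set.nodup_ofList v
    have hmem : c ∈ (PySem.Set.ofList v).toFinset := by
      simp [List.mem_toFinset, (PySem.Set.mem_ofList v c).2 hc]
    unfold pvS
    rw [hof, hadd]
    rw [← List.sum_toFinset _ hnd, ← List.sum_toFinset _ hnd]
    rw [← Finset.sum_erase_add _ _ hmem, ← Finset.sum_erase_add _ (fun x => ((v.count x : Int)) ^ 2) hmem]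
    have hcong : ∑ x ∈ (PySem.Set.ofList v).toFinset.erase c, (((v ++ [c]).count x : Int)) ^ 2
        = ∑ x ∈ (PySem.Set.ofList v).toFinset.erase c, ((v.count x : Int)) ^ 2 := by
      apply Finset.sum_congr rfl
      intro x hx
      have hne : x ≠ c := (Finset.mem_erase.1 hx).1
      rw [List.count_append, List.count_singleton']
      rw [if_neg (fun h => hne h.symm)]
      push_cast
      ring
    rw [hcong]
    have hcc : (((v ++ [c]).count c : Int)) ^ 2 = ((v.count c : Int)) ^ 2 + 2 * (v.count c : Int) + 1 := by
      have h1 : (v ++ [c]).count c = v.count c + 1 := by simp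
      rw [h1]
      push_cast
      ring
    rw [hcc]
    ring
  · -- new color: the set gains c, whose count in v ++ [c] is 1; other counts unchanged
    have hadd : PySem.Set.add (PySem.Set.ofList v) c = PySem.Set.ofList v ++ [c] := by
      unfold PySem.Set.add
      rw [if_neg]
      intro h
      exact hc ((PySem.Set.mem_ofList v c).1 ((PySem.Set.contains_iff _ _).1 h))
    have h0 : v.count c = 0 := List.count_eq_zero.2 hc
    unfold pvS
    rw [hof, hadd, List.map_append, List.sum_append]
    have hcong : (PySem.Set.ofList v).map (fun x => (((v ++ [c]).count x : Int)) ^ 2)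
        = (PySem.Set.ofList v).map (fun x => ((v.count x : Int)) ^ 2) := by
      apply List.map_congr_left
      intro x hx
      have hne : x ≠ c := fun h => hc (h ▸ (PySem.Set.mem_ofList v x).1 hx)
      rw [List.count_append, List.count_singleton']
      rw [if_neg (fun h => hne h.symm)]
      push_cast
      ring
    rw [hcong]
    simp [List.count_append, List.count_singleton, h0]

lemma pvCounter_append (u : List String) (c : String) :
    PySem.Dict.counter (u ++ [c])
      = (PySem.Dict.counter u).insert c ((PySem.Dict.counter u).getD c 0 + 1) := by
  unfold PySem.Dict.counter
  rw [List.foldl_append]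
  rfl

lemma pvBfold (w u : List String) :
    (w.foldl pvStepB (PySem.Dict.counter u, pvS u)).2 = pvS (u ++ w) := by
  induction w generalizing u with
  | nil => simp
  | cons c w ih =>
    have hstep : pvStepB (PySem.Dict.counter u, pvS u) c
        = (PySem.Dict.counter (u ++ [c]), pvS (u ++ [c])) := by
      unfold pvStepB
      rw [pvCounter_append, PySem.Dict.getD_counter, pvS_append]
    rw [List.foldl_cons, hstep, ih (u ++ [c])]
    simp

lemma pvB_eq_S (coloring : List (Int × String)) :
    eval_sum_of_squared_color_sizes_alt coloring = pvS (coloring.map (fun p => p.2)) := by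
  unfold eval_sum_of_squared_color_sizes_alt
  have h0 : (PySem.Dict.empty : PySem.Dict String Int) = PySem.Dict.counter [] := rfl
  have h1 : (0 : Int) = pvS [] := rfl
  rw [h0, h1, pvBfold]
  simp

-- ===== VERDICT (by name: the statement is the Claim_ definition above) =====
theorem eval_sum_of_squared_color_sizes_spec : Claim_equal_eval_sum_of_squared_color_sizes := by
  intro coloring _
  unfold Spec_eval_sum_of_squared_color_sizes
  rw [pvA_eq_S, pvB_eq_S]
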